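-- pv_equiv track=rewrite | github.com/thoftheocean/ai-surgical | tools/email_inbox/email_inbox_reader_app.py | guess_smtp_server
-- ===== SOURCE A (Python) =====
-- SMTP_PRESETS = {
--     "gmail.com": ("smtp.gmail.com", 587),
--     "googlemail.com": ("smtp.gmail.com", 587),
--     "outlook.com": ("smtp.office365.com", 587),
--     "hotmail.com": ("smtp.office365.com", 587),
--     "live.com": ("smtp.office365.com", 587),
--     "office365.com": ("smtp.office365.com", 587),
--     "qq.com": ("smtp.qq.com", 587),
--     "foxmail.com": ("smtp.qq.com", 587),
--     "163.com": ("smtp.163.com", 465),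
--     "126.com": ("smtp.126.com", 465),
--     "yahoo.com": ("smtp.mail.yahoo.com", 587),
--     "icloud.com": ("smtp.mail.me.com", 587),
-- }
--
-- def _domain(addr: str) -> str | None:
--     """从邮箱地址提取域名，无效则返回 None"""
--     addr = (addr or "").strip().lower()
--     if "@" in addr:
--         return addr.split("@", 1)[1]
--     return None
--
-- def guess_smtp_server(addr: str) -> tuple[str, int]:
--     """
--     根据邮箱地址推断 SMTP 服务器。
--     先在预设表中查找；若未匹配，则按域名自动生成 smtp.{域名}，如 smtp.retrorabbit.net。
--     端口默认 587（Submission）。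
--     """
--     domain = _domain(addr)
--     if domain:
--         for suffix, (host, port) in SMTP_PRESETS.items():
--             if domain == suffix or domain.endswith("." + suffix):
--                 return host, port
--         return f"smtp.{domain}", 587
--     return "smtp.gmail.com", 587  # 无法解析时的默认
-- ===== SOURCE B (Python) =====
-- SMTP_PRESETS = {
--     "gmail.com": ("smtp.gmail.com", 587),
--     "googlemail.com": ("smtp.gmail.com", 587),
--     "outlook.com": ("smtp.office365.com", 587),
--     "hotmail.com": ("smtp.office365.com", 587),
--     "live.com": ("smtp.office365.com", 587),
--     "office365.com": ("smtp.office365.com", 587),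
--     "qq.com": ("smtp.qq.com", 587),
--     "foxmail.com": ("smtp.qq.com", 587),
--     "163.com": ("smtp.163.com", 465),
--     "126.com": ("smtp.126.com", 465),
--     "yahoo.com": ("smtp.mail.yahoo.com", 587),
--     "icloud.com": ("smtp.mail.me.com", 587),
-- }
--
-- def guess_smtp_server(addr: str) -> tuple[str, int]:
--     addr = (addr or "").strip().lower()
--     if "@" not in addr:
--         return "smtp.gmail.com", 587
--     domain = addr.split("@", 1)[1]
--     if not domain:
--         return "smtp.gmail.com", 587
--     # walk the domain's dot-suffixes (the full domain, then after each dot) and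
--     # look each one up in the preset table
--     candidates = [domain] + [domain[i + 1:] for i in range(len(domain)) if domain[i] == "."]
--     for cand in candidates:
--         hit = SMTP_PRESETS.get(cand)
--         if hit is not None:
--             return hit
--     return f"smtp.{domain}", 587
-- ===== Notes on version B (the rewrite author's own statement) =====
-- stated objective: idiomatic
-- what changed: Instead of scanning the whole SMTP_PRESETS table testing each key with equality/endswith, B builds the domain's own dot-suffix candidates (the full domain, then the part after each dot) and returns the first one found by a direct dict lookup.
import Mathlib
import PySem

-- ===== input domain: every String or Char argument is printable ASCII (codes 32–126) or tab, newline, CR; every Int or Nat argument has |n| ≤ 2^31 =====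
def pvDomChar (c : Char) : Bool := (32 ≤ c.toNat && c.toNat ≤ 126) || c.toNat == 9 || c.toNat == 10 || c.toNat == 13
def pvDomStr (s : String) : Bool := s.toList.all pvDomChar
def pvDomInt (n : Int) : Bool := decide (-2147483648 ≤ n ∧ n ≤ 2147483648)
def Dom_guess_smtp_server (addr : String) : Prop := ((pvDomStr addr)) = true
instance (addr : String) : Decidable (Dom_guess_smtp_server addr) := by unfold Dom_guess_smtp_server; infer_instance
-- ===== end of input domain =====

-- B walks the domain's own dot-suffix candidates and looks each one up in the preset dict,
-- instead of A's scan over the preset table with equality/endswith tests (objective: idiomatic).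

-- ===== PORT A =====
-- the module constant SMTP_PRESETS (keys as char lists)
def pvPresets : List (List Char × (String × Int)) :=
  [("gmail.com".toList, ("smtp.gmail.com", 587)),
   ("googlemail.com".toList, ("smtp.gmail.com", 587)),
   ("outlook.com".toList, ("smtp.office365.com", 587)),
   ("hotmail.com".toList, ("smtp.office365.com", 587)),
   ("live.com".toList, ("smtp.office365.com", 587)),
   ("office365.com".toList, ("smtp.office365.com", 587)),
   ("qq.com".toList, ("smtp.qq.com", 587)),
   ("foxmail.com".toList, ("smtp.qq.com", 587)),
   ("163.com".toList, ("smtp.163.com", 465)),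
   ("126.com".toList, ("smtp.126.com", 465)),
   ("yahoo.com".toList, ("smtp.mail.yahoo.com", 587)),
   ("icloud.com".toList, ("smtp.mail.me.com", 587))]

-- _domain(addr): (addr or "").strip().lower(); the part after the first "@", or None
def pvAddrDomain (addr : String) : Option (List Char) :=
  let a := PySem.Chars.lower (PySem.Chars.strip (if addr = "" then "" else addr).toList)
  if PySem.Chars.isIn "@".toList a then
    -- addr.split("@", 1)[1]; the piece at index 1 exists because "@" occurs in a
    some ((PySem.Chars.splitOnMax a "@".toList 1).getD 1 [])
  else none

-- A's for-loop over SMTP_PRESETS.items()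
def pvScanA (dom : List Char) : List (List Char × (String × Int)) → Option (String × Int)
  | [] => none
  | (s, hp) :: rest =>
      if dom = s ∨ PySem.Chars.endswith dom ('.' :: s) = true then some hp
      else pvScanA dom rest

def guess_smtp_server (addr : String) : String × Int :=
  match pvAddrDomain addr with
  | none => ("smtp.gmail.com", 587)
  | some dom =>
      if dom = [] then ("smtp.gmail.com", 587)
      else
        match pvScanA dom pvPresets with
        | some hp => hp
        | none => (String.ofList ("smtp.".toList ++ dom), 587)

-- ===== PORT B =====
-- SMTP_PRESETS as the dict it is, for .get lookups
def pvPresetDict : PySem.Dict (List Char) (String × Int) := PySem.Dict.ofList pvPresets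

-- [domain] + [domain[i+1:] for i in range(len(domain)) if domain[i] == "."]
def pvCandidates (dom : List Char) : List (List Char) :=
  dom :: ((PySem.List.pyRange 0 (dom.length : Int) 1).filter
            (fun i => PySem.List.pyGet? dom i == some '.')).map
            (fun i => PySem.Chars.slice dom (some (i + 1)) none)

-- B's for-loop: first candidate present in the dict
def pvScanB : List (List Char) → Option (String × Int)
  | [] => none
  | c :: rest =>
      match pvPresetDict.get? c with
      | some hp => some hp
      | none => pvScanB rest

def guess_smtp_server_alt (addr : String) : String × Int :=
  let a := PySem.Chars.lower (PySem.Chars.strip (if addr = "" then "" else addr).toList)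
  if ¬ PySem.Chars.isIn "@".toList a then ("smtp.gmail.com", 587)
  else
    let dom := (PySem.Chars.splitOnMax a "@".toList 1).getD 1 []
    if dom = [] then ("smtp.gmail.com", 587)
    else
      match pvScanB (pvCandidates dom) with
      | some hp => hp
      | none => (String.ofList ("smtp.".toList ++ dom), 587)

-- ===== PRECONDITION & SPEC =====
def Spec_guess_smtp_server (addr : String) (out : String × Int) : Prop := out = guess_smtp_server_alt addr
instance (addr : String) (out : String × Int) : Decidable (Spec_guess_smtp_server addr out) := by unfold Spec_guess_smtp_server; infer_instance

-- ===== CLAIM (what is proved, stated in full; the proofs are below) =====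
def Claim_equal_guess_smtp_server : Prop := ∀ (addr : String), Dom_guess_smtp_server addr → Spec_guess_smtp_server addr (guess_smtp_server addr)

-- ===== LEMMAS AND PROOFS =====

-- "domain matches preset key s" — A's loop condition, as a Prop on char lists
def pvMatch (dom s : List Char) : Prop := dom = s ∨ ('.' :: s) <:+ dom

-- no preset key, prefixed with '.', is a suffix of another preset key
lemma pvNoCross : ∀ p ∈ pvPresets, ∀ q ∈ pvPresets, ¬ ('.' :: q.1 <:+ p.1) := by decide

lemma pvKeysNodup : (pvPresets.map Prod.fst).Nodup := by decide

lemma pvDictItems : pvPresetDict.items = pvPresets := by decide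

lemma pvDictKeys : pvPresetDict.keys = pvPresets.map Prod.fst := by decide

lemma suffix_of_suffix_cons {α : Type} {x : α} {l1 l2 : List α}
    (h : l1 <:+ x :: l2) (hl : l1.length ≤ l2.length) : l1 <:+ l2 := by
  obtain ⟨pre, hp⟩ := h
  cases pre with
  | nil => simp at hp; subst hp; simp at hl
  | cons y t =>
      refine ⟨t, ?_⟩
      simpa using congrArg List.tail hp

lemma pvMatchUnique {dom : List Char} {p q : List Char × (String × Int)}
    (hp : p ∈ pvPresets) (hq : q ∈ pvPresets)
    (h1 : pvMatch dom p.1) (h2 : pvMatch dom q.1) : p.1 = q.1 := by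
  rcases h1 with h1 | h1 <;> rcases h2 with h2 | h2
  · rw [← h1, ← h2]
  · exact absurd (h1 ▸ h2) (pvNoCross p hp q hq)
  · exact absurd (h2 ▸ h1) (pvNoCross q hq p hp)
  · -- both '.'-prefixed keys are suffixes of dom, hence comparable
    rcases List.suffix_or_suffix_of_suffix h1 h2 with h | h
    · rcases Nat.lt_or_ge p.1.length q.1.length with hlt | hge
      · exact absurd (suffix_of_suffix_cons h (by simpa using hlt))
          (pvNoCross q hq p hp)
      · have hlen := h.length_le
        simp only [List.length_cons] at hlen
        have := List.IsSuffix.eq_of_length h (by simp; omega)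
        exact (List.cons.injEq _ _ _ _ ▸ this).2
    · rcases Nat.lt_or_ge q.1.length p.1.length with hlt | hge
      · exact absurd (suffix_of_suffix_cons h (by simpa using hlt))
          (pvNoCross p hp q hq)
      · have hlen := h.length_le
        simp only [List.length_cons] at hlen
        have := List.IsSuffix.eq_of_length h (by simp; omega)
        exact ((List.cons.injEq _ _ _ _ ▸ this).2).symm

lemma mem_candidates_iff (dom c : List Char) : c ∈ pvCandidates dom ↔ pvMatch dom c := by
  unfold pvCandidates pvMatch
  simp only [List.mem_cons, List.mem_map, List.mem_filter, PySem.List.mem_pyRange_one,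
    PySem.Chars.slice_eq_listSlice]
  constructor
  · rintro (rfl | ⟨i, ⟨⟨h0, hlt⟩, hdot⟩, rfl⟩)
    · exact Or.inl rfl
    · right
      obtain ⟨n, rfl⟩ := Int.eq_ofNat_of_zero_le h0
      have hn : n < dom.length := by exact_mod_cast hlt
      rw [PySem.List.pyGet?_natCast] at hdot
      have hget : dom[n]? = some '.' := by simpa using hdot
      have : ((n : Int) + 1) = ((n + 1 : Nat) : Int) := by push_cast; ring
      rw [this, PySem.List.slice_from_natCast]
      have hd : dom[n] = '.' := by
        have := List.getElem?_eq_getElem hn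
        rw [this] at hget; exact Option.some.injEq _ _ ▸ hget
      calc '.' :: List.drop (n + 1) dom
          = dom[n] :: List.drop (n + 1) dom := by rw [hd]
        _ = List.drop n dom := List.getElem_cons_drop hn
        _ <:+ dom := List.drop_suffix n dom
  · rintro (rfl | ⟨pre, hpre⟩)
    · exact Or.inl rfl
    · right
      refine ⟨(pre.length : Int), ⟨⟨by positivity, ?_⟩, ?_⟩, ?_⟩
      · have hlt : pre.length < dom.length := by
          rw [← hpre]; simp only [List.length_append, List.length_cons]; omega
        exact_mod_cast hlt
      · rw [PySem.List.pyGet?_natCast, ← hpre]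
        simp
      · have : ((pre.length : Int) + 1) = ((pre.length + 1 : Nat) : Int) := by push_cast; ring
        rw [this, PySem.List.slice_from_natCast, ← hpre]
        simp [List.drop_append]

lemma scanA_none_iff (dom : List Char) (ps : List (List Char × (String × Int))) :
    pvScanA dom ps = none ↔ ∀ p ∈ ps, ¬ pvMatch dom p.1 := by
  induction ps with
  | nil => simp [pvScanA]
  | cons hd tl ih =>
      obtain ⟨s, hp⟩ := hd
      by_cases h : dom = s ∨ PySem.Chars.endswith dom ('.' :: s) = true
      · simp only [pvScanA, if_pos h]
        have hm : pvMatch dom s := by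
          rcases h with h | h
          · exact Or.inl h
          · exact Or.inr ((PySem.Chars.endswith_iff dom ('.' :: s)).mp h)
        simp only [List.mem_cons]
        constructor
        · intro h'; cases h'
        · intro h'; exact absurd hm (h' (s, hp) (Or.inl rfl))
      · simp only [pvScanA, if_neg h, ih, List.mem_cons]
        constructor
        · rintro h' p (rfl | hmem)
          · rintro (h1 | h1)
            · exact h (Or.inl h1)
            · exact h (Or.inr ((PySem.Chars.endswith_iff dom ('.' :: s)).mpr h1))
          · exact h' p hmem
        · intro h' p hmem; exact h' p (Or.inr hmem)

lemma scanA_some (dom : List Char) (ps : List (List Char × (String × Int)))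
    {v : String × Int} (h : pvScanA dom ps = some v) :
    ∃ k, (k, v) ∈ ps ∧ pvMatch dom k := by
  induction ps with
  | nil => simp [pvScanA] at h
  | cons hd tl ih =>
      obtain ⟨s, hp⟩ := hd
      by_cases hc : dom = s ∨ PySem.Chars.endswith dom ('.' :: s) = true
      · simp only [pvScanA, if_pos hc] at h
        have hv : hp = v := Option.some.inj h
        refine ⟨s, ?_, ?_⟩
        · rw [← hv]; exact List.mem_cons_self
        · rcases hc with hc | hc
          · exact Or.inl hc
          · exact Or.inr ((PySem.Chars.endswith_iff dom ('.' :: s)).mp hc)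
      · simp only [pvScanA, if_neg hc] at h
        obtain ⟨k, hmem, hm⟩ := ih h
        exact ⟨k, List.mem_cons_of_mem _ hmem, hm⟩

lemma scanB_none (cl : List (List Char))
    (h : ∀ c ∈ cl, pvPresetDict.get? c = none) : pvScanB cl = none := by
  induction cl with
  | nil => rfl
  | cons c rest ih =>
      simp only [pvScanB]
      rw [h c (List.mem_cons_self)]
      exact ih (fun c' hc' => h c' (List.mem_cons_of_mem _ hc'))

lemma scanB_some (cl : List (List Char)) (k : List Char) (v : String × Int)
    (hk : k ∈ cl) (hv : pvPresetDict.get? k = some v)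
    (huniq : ∀ c ∈ cl, ∀ hp, pvPresetDict.get? c = some hp → c = k) :
    pvScanB cl = some v := by
  induction cl with
  | nil => cases hk
  | cons c rest ih =>
      simp only [pvScanB]
      cases hg : pvPresetDict.get? c with
      | some hp =>
          have hck : c = k := huniq c List.mem_cons_self hp hg
          rw [hck, hv] at hg
          rw [← hg]
      | none =>
          have hck : k ≠ c := by rintro rfl; rw [hv] at hg; cases hg
          have hk' : k ∈ rest := by
            rcases List.mem_cons.mp hk with h | h
            · exact absurd h hck
            · exact h
          exact ih hk' (fun c' hc' hp hgp => huniq c' (List.mem_cons_of_mem _ hc') hp hgp)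

lemma pvGet?_some_iff (c : List Char) (v : String × Int) :
    pvPresetDict.get? c = some v ↔ (c, v) ∈ pvPresets := by
  rw [PySem.Dict.get?_eq_some_iff_mem_items pvPresetDict c v (pvDictKeys ▸ pvKeysNodup), pvDictItems]

lemma scan_eq (dom : List Char) :
    pvScanB (pvCandidates dom) = pvScanA dom pvPresets := by
  cases h : pvScanA dom pvPresets with
  | none =>
      apply scanB_none
      intro c hc
      cases hg : pvPresetDict.get? c with
      | none => rfl
      | some hp =>
          exfalso
          have hmem : (c, hp) ∈ pvPresets := (pvGet?_some_iff c hp).mp hg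
          have hm : pvMatch dom c := (mem_candidates_iff dom c).mp hc
          exact (scanA_none_iff dom pvPresets).mp h (c, hp) hmem hm
  | some v =>
      obtain ⟨k, hkmem, hkm⟩ := scanA_some dom pvPresets h
      apply scanB_some _ k v
      · exact (mem_candidates_iff dom k).mpr hkm
      · exact (pvGet?_some_iff k v).mpr hkmem
      · intro c hc hp hgp
        have hcmem : (c, hp) ∈ pvPresets := (pvGet?_some_iff c hp).mp hgp
        have hcm : pvMatch dom c := (mem_candidates_iff dom c).mp hc
        exact pvMatchUnique hcmem hkmem hcm hkm

-- ===== VERDICT (by name: the statement is the Claim_ definition above) =====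
theorem guess_smtp_server_spec : Claim_equal_guess_smtp_server := by
  intro addr _
  unfold Spec_guess_smtp_server guess_smtp_server guess_smtp_server_alt pvAddrDomain
  by_cases hin : PySem.Chars.isIn "@".toList
      (PySem.Chars.lower (PySem.Chars.strip (if addr = "" then "" else addr).toList)) = true
  · simp only [hin, if_pos, not_true, ite_false, scan_eq]
  · have hfalse : PySem.Chars.isIn ['@']
        (PySem.Chars.lower (PySem.Chars.strip (if addr = "" then "" else addr).toList)) = false := by
      simpa using hin
    simp [hfalse]
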